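-- pv_equiv track=rewrite | github.com/mamontov-cpp/lp-image-transform | main.py | parse_cmd_options
-- ===== SOURCE A (Python) =====
-- def parse_cmd_options(argv: list[str]) -> tuple[bool, bool]:
--     use_alpha = True
--     count_colors = True
--     for part in argv:
--         if part == "--no-alpha":
--             use_alpha = False
--         if part == "--no-color-count":
--             count_colors = False
--         if part == "--use-alpha":
--             use_alpha = True
--         if part == "--use-color-count":
--             count_colors = True
--     return use_alpha, count_colors
-- ===== SOURCE B (Python) =====
-- def parse_cmd_options(argv: list[str]) -> tuple[bool, bool]:
--     alpha = [a for a in argv if a in ("--no-alpha", "--use-alpha")]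
--     color = [a for a in argv if a in ("--no-color-count", "--use-color-count")]
--     use_alpha = alpha[-1] != "--no-alpha" if alpha else True
--     count_colors = color[-1] != "--no-color-count" if color else True
--     return use_alpha, count_colors
-- ===== Notes on version B (the rewrite author's own statement) =====
-- stated objective: alternative
-- what changed: Instead of one scan mutating both booleans flag by flag, B filters argv down to each group's flags and derives each boolean from the last relevant flag (default True if none).
import Mathlib
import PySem

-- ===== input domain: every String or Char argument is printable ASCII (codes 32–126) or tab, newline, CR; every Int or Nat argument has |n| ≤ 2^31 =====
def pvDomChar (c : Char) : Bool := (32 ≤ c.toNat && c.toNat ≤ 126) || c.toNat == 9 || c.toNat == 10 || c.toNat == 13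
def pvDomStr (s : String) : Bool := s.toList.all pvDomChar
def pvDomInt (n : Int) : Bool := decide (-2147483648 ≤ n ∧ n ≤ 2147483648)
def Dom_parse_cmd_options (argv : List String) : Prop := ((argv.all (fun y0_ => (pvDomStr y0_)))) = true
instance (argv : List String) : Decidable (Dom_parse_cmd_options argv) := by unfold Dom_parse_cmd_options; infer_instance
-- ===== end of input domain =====

-- B derives each boolean from the last relevant flag of its group (filter + last) instead of A's single scan mutating both; alternative decomposition, same cost.
-- ===== PORT A =====
def pvStepA (s : Bool × Bool) (part : String) : Bool × Bool :=
  let s := if part = "--no-alpha" then (false, s.2) else s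
  let s := if part = "--no-color-count" then (s.1, false) else s
  let s := if part = "--use-alpha" then (true, s.2) else s
  let s := if part = "--use-color-count" then (s.1, true) else s
  s

def parse_cmd_options (argv : List String) : Bool × Bool :=
  argv.foldl pvStepA (true, true)

-- ===== PORT B =====
-- the last flag of the group {noS, yesS} in argv decides; default True
def pvLastFlag (noS yesS : String) (argv : List String) : Bool :=
  let f := argv.filter (fun a => a == noS || a == yesS)
  if f.isEmpty then true else f.getLastD "" != noS

def parse_cmd_options_alt (argv : List String) : Bool × Bool :=
  (pvLastFlag "--no-alpha" "--use-alpha" argv,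
   pvLastFlag "--no-color-count" "--use-color-count" argv)

-- ===== PRECONDITION & SPEC =====
def Spec_parse_cmd_options (argv : List String) (out : Bool × Bool) : Prop := out = parse_cmd_options_alt argv
instance (argv : List String) (out : Bool × Bool) : Decidable (Spec_parse_cmd_options argv out) := by unfold Spec_parse_cmd_options; infer_instance

-- ===== CLAIM (what is proved, stated in full; the proofs are below) =====
def Claim_equal_parse_cmd_options : Prop := ∀ (argv : List String), Dom_parse_cmd_options argv → Spec_parse_cmd_options argv (parse_cmd_options argv)

-- ===== LEMMAS AND PROOFS =====

-- ===== VERDICT (by name: the statement is the Claim_ definition above) =====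
-- one-component update: what pvStepA does to a single boolean of the pair
def pvUpd (noS yesS : String) (b : Bool) (part : String) : Bool :=
  if part = noS then false else if part = yesS then true else b

theorem pvStepA_fst (s : Bool × Bool) (part : String) :
    (pvStepA s part).1 = pvUpd "--no-alpha" "--use-alpha" s.1 part := by
  simp only [pvStepA, pvUpd]
  split_ifs with h1 h2 h3 h4 <;> simp_all

theorem pvStepA_snd (s : Bool × Bool) (part : String) :
    (pvStepA s part).2 = pvUpd "--no-color-count" "--use-color-count" s.2 part := by
  simp only [pvStepA, pvUpd]
  split_ifs with h1 h2 h3 h4 <;> simp_all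

theorem pvFoldl_fst (l : List String) (s : Bool × Bool) :
    (l.foldl pvStepA s).1 = l.foldl (pvUpd "--no-alpha" "--use-alpha") s.1 := by
  induction l generalizing s with
  | nil => rfl
  | cons x xs ih => simp [List.foldl, ih, pvStepA_fst]

theorem pvFoldl_snd (l : List String) (s : Bool × Bool) :
    (l.foldl pvStepA s).2 = l.foldl (pvUpd "--no-color-count" "--use-color-count") s.2 := by
  induction l generalizing s with
  | nil => rfl
  | cons x xs ih => simp [List.foldl, ih, pvStepA_snd]

theorem pvGetLastD_irrel (l : List String) (h : l ≠ []) (d d' : String) :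
    l.getLastD d = l.getLastD d' := by
  cases l with
  | nil => exact absurd rfl h
  | cons x xs => simp [List.getLastD]

theorem pvFold_eq_lastFlag (noS yesS : String) (hne : noS ≠ yesS)
    (l : List String) (b : Bool) :
    l.foldl (pvUpd noS yesS) b =
      (if (l.filter (fun a => a == noS || a == yesS)).isEmpty then b
       else (l.filter (fun a => a == noS || a == yesS)).getLastD "" != noS) := by
  induction l generalizing b with
  | nil => rfl
  | cons x xs ih =>
    simp only [List.foldl, List.filter_cons]
    by_cases hx : (x == noS || x == yesS) = true
    · simp only [hx, if_pos, List.isEmpty_cons, Bool.false_eq_true, if_false]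
      rw [ih]
      by_cases he : (xs.filter (fun a => a == noS || a == yesS)).isEmpty
      · rw [if_pos he]
        have : xs.filter (fun a => a == noS || a == yesS) = [] := by
          simpa [List.isEmpty_iff] using he
        simp only [this, List.getLastD]
        simp only [Bool.or_eq_true, beq_iff_eq] at hx
        rcases hx with h | h
        · subst h; simp [pvUpd]
        · subst h; simp [pvUpd, Ne.symm hne]
      · rw [if_neg he]
        have hnil : xs.filter (fun a => a == noS || a == yesS) ≠ [] := by
          simpa [List.isEmpty_iff] using he
        have : (x :: xs.filter (fun a => a == noS || a == yesS)).getLastD "" =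
               (xs.filter (fun a => a == noS || a == yesS)).getLastD "" := by
          rw [List.getLastD_cons]
          exact pvGetLastD_irrel _ hnil x ""
        rw [this]
    · simp only [Bool.not_eq_true] at hx
      simp only [hx, Bool.false_eq_true, if_false]
      rw [ih]
      have hno : x ≠ noS := by
        intro h; subst h; simp at hx
      have hyes : x ≠ yesS := by
        intro h; subst h; simp at hx
      simp [pvUpd, hno, hyes]

-- ===== VERDICT (by name: the statement is the Claim_ definition above) =====
theorem parse_cmd_options_spec : Claim_equal_parse_cmd_options := by
  intro argv _
  unfold Spec_parse_cmd_options parse_cmd_options parse_cmd_options_alt pvLastFlag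
  have h1 := pvFoldl_fst argv (true, true)
  have h2 := pvFoldl_snd argv (true, true)
  have e1 := pvFold_eq_lastFlag "--no-alpha" "--use-alpha" (by decide) argv true
  have e2 := pvFold_eq_lastFlag "--no-color-count" "--use-color-count" (by decide) argv true
  apply Prod.ext <;> simp_all
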